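-- pv_equiv track=rewrite | github.com/LP-RG/subxpat | translator_to_forallZ3.py | generate_atmost_constraints
-- ===== SOURCE A (Python) =====
-- from typing import Iterable, List, Callable, Any, Union, Tuple
--
-- def generate_and_join(function: Callable[..., Iterable[str]],
--                       ranges: List[Union[int, Iterable]],
--                       joiner: str,
--                       __internal: List[int] = []) -> str:
--     """
--     Args:
--         function (Callable[..., str]): it must take in one argument per element in ranges.\
--             If 'ranges' contains iterables then the function needs 2 arguments for that (index, value).
--     """
--
--     strings = []
--
--     if len(ranges) == 1:
--         # end case
--         if type(ranges[0]) is int: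
--             for i in range(ranges[0]):
--                 strings.extend(function(*__internal, i))
--         else:
--             for i, v in enumerate(ranges[0]):
--                 strings.extend(function(*__internal, i, v))
--
--     else:
--         # middle case
--         if type(ranges[0]) is int:
--             for i in range(ranges[0]):
--                 strings.append(generate_and_join(function, ranges[1:], joiner, __internal + [i]))
--         else:
--             for i, v in enumerate(ranges[0]):
--                 strings.append(generate_and_join(function, ranges[1:], joiner, __internal + [i, v]))
--
--     return joiner.join(strings)
--
-- def generate_atmost_constraints(trees_per_output: int,
--                                 literal_per_tree: int,
--                                 inputs_count: int, outputs_count: int) -> str: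
--     # create all constraints
--     constraints: 'list[str]' = []
--     for output_id in range(outputs_count):
--         for tree_id in range(trees_per_output):
--             def generator(_0, o_id, _1, t_id, i_id):
--                 return [f"If(p_o{o_id}_t{t_id}_i{i_id}_s, 1, 0)"]
--                 # return [f"p_o{o_id}_t{t_id}_i{i_id}_s"]
--
--             # string = generate_and_join(generator, [[output_id], [tree_id], inputs_count], ", ")
--             # atmost = f"AtMost({string}, {literal_per_tree})"
--             string = generate_and_join(generator, [[output_id], [tree_id], inputs_count], " + ")
--             atmost = f"({string}) <= {literal_per_tree}"
--             constraints.append(atmost)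
--
--     return ",\n".join(constraints)
-- ===== SOURCE B (Python) =====
-- def generate_atmost_constraints(trees_per_output: int,
--                                 literal_per_tree: int,
--                                 inputs_count: int, outputs_count: int) -> str:
--     return ",\n".join(
--         "({}) <= {}".format(
--             " + ".join(f"If(p_o{o}_t{t}_i{i}_s, 1, 0)" for i in range(inputs_count)),
--             literal_per_tree)
--         for o in range(outputs_count)
--         for t in range(trees_per_output)
--     )
-- ===== Notes on version B (the rewrite author's own statement) =====
-- stated objective: simpler
-- what changed: Drops the generic recursive generate_and_join helper (with its __internal accumulator, per-level joins, and heterogeneous int/iterable ranges) in favour of one flat nested comprehension that builds each clause directly.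
import Mathlib
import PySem

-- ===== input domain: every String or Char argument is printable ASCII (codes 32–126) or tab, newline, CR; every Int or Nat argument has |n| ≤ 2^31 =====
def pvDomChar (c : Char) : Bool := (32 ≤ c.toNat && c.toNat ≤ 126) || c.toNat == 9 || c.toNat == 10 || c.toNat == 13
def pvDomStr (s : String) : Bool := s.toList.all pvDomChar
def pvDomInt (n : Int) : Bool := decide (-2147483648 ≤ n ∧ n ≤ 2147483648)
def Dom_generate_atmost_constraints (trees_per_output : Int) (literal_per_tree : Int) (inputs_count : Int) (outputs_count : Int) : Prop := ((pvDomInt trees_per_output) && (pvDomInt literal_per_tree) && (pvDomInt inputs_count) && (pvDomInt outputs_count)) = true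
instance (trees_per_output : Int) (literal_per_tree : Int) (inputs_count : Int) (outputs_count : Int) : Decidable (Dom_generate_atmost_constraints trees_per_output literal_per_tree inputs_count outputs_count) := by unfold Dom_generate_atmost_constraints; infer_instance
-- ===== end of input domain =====

-- ===== PORT A =====
-- B changes structure only (flat comprehension instead of the recursive generate_and_join); same result, same cost.
-- Literal port of A, with generate_and_join specialized to its one call shape
-- ranges = [[output_id], [tree_id], inputs_count] (each level keeps its loop/join step for step).

-- generator(_0, o_id, _1, t_id, i_id) = [f"If(p_o{o_id}_t{t_id}_i{i_id}_s, 1, 0)"]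
def pvGenerator (o_id : Int) (t_id : Int) (i_id : Int) : List String :=
  ["If(p_o" ++ PySem.Int.toStr o_id ++ "_t" ++ PySem.Int.toStr t_id ++ "_i" ++ PySem.Int.toStr i_id ++ "_s, 1, 0)"]

-- generate_and_join at the end case: ranges = [inputs_count] (an int), __internal = [0, o, 0, t]
def pvGaj_end (o t : Int) (inputs_count : Int) : String :=
  String.intercalate " + "
    ((PySem.List.pyRange 0 inputs_count 1).foldl (fun strings i => strings ++ pvGenerator o t i) [])

-- middle case: ranges = [[tree_id], inputs_count], ranges[0] an iterable, enumerate
def pvGaj_mid (o : Int) (tree_id : Int) (inputs_count : Int) : String :=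
  String.intercalate " + "
    ((PySem.List.enumerate [tree_id] 0).foldl (fun strings iv => strings ++ [pvGaj_end o iv.2 inputs_count]) [])

-- outer case: ranges = [[output_id], [tree_id], inputs_count]
def pvGaj_top (output_id : Int) (tree_id : Int) (inputs_count : Int) : String :=
  String.intercalate " + "
    ((PySem.List.enumerate [output_id] 0).foldl (fun strings iv => strings ++ [pvGaj_mid iv.2 tree_id inputs_count]) [])

def generate_atmost_constraints (trees_per_output : Int) (literal_per_tree : Int) (inputs_count : Int) (outputs_count : Int) : String :=
  String.intercalate ",\n"
    ((PySem.List.pyRange 0 outputs_count 1).foldl (fun constraints output_id =>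
      (PySem.List.pyRange 0 trees_per_output 1).foldl (fun constraints tree_id =>
        constraints ++ ["(" ++ pvGaj_top output_id tree_id inputs_count ++ ") <= " ++ PySem.Int.toStr literal_per_tree]) constraints) [])

-- ===== PORT B =====
def generate_atmost_constraints_alt (trees_per_output : Int) (literal_per_tree : Int) (inputs_count : Int) (outputs_count : Int) : String :=
  String.intercalate ",\n"
    ((PySem.List.pyRange 0 outputs_count 1).flatMap (fun o =>
      (PySem.List.pyRange 0 trees_per_output 1).map (fun t =>
        "(" ++ String.intercalate " + "
            ((PySem.List.pyRange 0 inputs_count 1).map (fun i =>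
              "If(p_o" ++ PySem.Int.toStr o ++ "_t" ++ PySem.Int.toStr t ++ "_i" ++ PySem.Int.toStr i ++ "_s, 1, 0)"))
          ++ ") <= " ++ PySem.Int.toStr literal_per_tree)))

-- ===== PRECONDITION & SPEC =====
def Spec_generate_atmost_constraints (trees_per_output : Int) (literal_per_tree : Int) (inputs_count : Int) (outputs_count : Int) (out : String) : Prop := out = generate_atmost_constraints_alt trees_per_output literal_per_tree inputs_count outputs_count
instance (trees_per_output : Int) (literal_per_tree : Int) (inputs_count : Int) (outputs_count : Int) (out : String) : Decidable (Spec_generate_atmost_constraints trees_per_output literal_per_tree inputs_count outputs_count out) := by unfold Spec_generate_atmost_constraints; infer_instance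

-- ===== CLAIM (what is proved, stated in full; the proofs are below) =====
def Claim_equal_generate_atmost_constraints : Prop := ∀ (trees_per_output : Int) (literal_per_tree : Int) (inputs_count : Int) (outputs_count : Int), Dom_generate_atmost_constraints trees_per_output literal_per_tree inputs_count outputs_count → Spec_generate_atmost_constraints trees_per_output literal_per_tree inputs_count outputs_count (generate_atmost_constraints trees_per_output literal_per_tree inputs_count outputs_count)

-- ===== LEMMAS AND PROOFS =====
theorem pvGaj_top_eq (o t n : Int) :
    pvGaj_top o t n = String.intercalate " + "
      ((PySem.List.pyRange 0 n 1).map (fun i =>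
        "If(p_o" ++ PySem.Int.toStr o ++ "_t" ++ PySem.Int.toStr t ++ "_i" ++ PySem.Int.toStr i ++ "_s, 1, 0)")) := by
  simp only [pvGaj_top, pvGaj_mid, pvGaj_end, PySem.List.enumerate, List.foldl_cons, List.foldl_nil,
    List.nil_append, PySem.List.foldl_append_singleton_eq_map, pvGenerator]
  rfl

theorem pv_foldl2_eq (f : Int -> Int -> String) (a b : List Int) (acc : List String) :
    a.foldl (fun cs o => b.foldl (fun cs t => cs ++ [f o t]) cs) acc
      = acc ++ a.flatMap (fun o => b.map (f o)) := by
  induction a generalizing acc with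
  | nil => simp
  | cons x xs ih =>
    rw [List.foldl_cons, PySem.List.foldl_append_singleton_eq_map, ih, List.flatMap_cons,
      List.append_assoc]

-- ===== VERDICT (by name: the statement is the Claim_ definition above) =====
theorem generate_atmost_constraints_spec : Claim_equal_generate_atmost_constraints := by
  intro tp lp ic oc _
  unfold Spec_generate_atmost_constraints generate_atmost_constraints generate_atmost_constraints_alt
  rw [pv_foldl2_eq]
  simp [pvGaj_top_eq]
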